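-- pv_equiv track=rewrite | github.com/Micah0320/n2-1_GraphSearch | main.py | string_to_mat
-- ===== SOURCE A (Python) =====
-- def string_to_mat(string, size):
--     ret = []
--     a = string.split(",")
--     place = 0
--     inner = []
--     for i in a:
--         inner.append(i)
--         place += 1
--         if place == size:
--             ret.append(inner)
--             place = 0
--             inner = []
--     return ret
-- ===== SOURCE B (Python) =====
-- def string_to_mat(string, size):
--     a = string.split(",")
--     if size == 0:
--         return []
--     n = len(a) // size
--     return [a[i * size:(i + 1) * size] for i in range(n)]
-- ===== Notes on version B (the rewrite author's own statement) =====
-- stated objective: idiomatic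
-- what changed: Replaces the element-by-element accumulation with a counter and partial-row buffer by computing the number of complete rows with floor division and building each row directly as a slice of the split list.
import Mathlib
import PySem

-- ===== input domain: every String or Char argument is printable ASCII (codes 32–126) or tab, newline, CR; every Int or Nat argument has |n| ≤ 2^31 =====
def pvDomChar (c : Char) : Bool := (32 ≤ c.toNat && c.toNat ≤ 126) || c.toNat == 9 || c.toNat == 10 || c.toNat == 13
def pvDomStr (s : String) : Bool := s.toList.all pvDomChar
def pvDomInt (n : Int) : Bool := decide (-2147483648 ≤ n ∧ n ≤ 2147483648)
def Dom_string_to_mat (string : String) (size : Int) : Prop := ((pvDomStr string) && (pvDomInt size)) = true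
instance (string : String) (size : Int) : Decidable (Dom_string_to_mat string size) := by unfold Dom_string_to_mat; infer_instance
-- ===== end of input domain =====

-- B replaces A's one-token-at-a-time accumulation (counter + partial-row buffer) by computing
-- the number of complete rows with floor division and slicing each row out directly (idiomatic).

-- ===== PORT A =====
-- A's for-loop over the split list, state (ret, place, inner)
def pvLoopA (size : Int) : List String → (List (List String) × Int × List String) → (List (List String) × Int × List String)
  | [], st => st
  | i :: rest, (ret, place, inner) =>
    let inner' := inner ++ [i]
    let place' := place + 1
    if place' = size then pvLoopA size rest (ret ++ [inner'], 0, [])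
    else pvLoopA size rest (ret, place', inner')

def string_to_mat (string : String) (size : Int) : List (List String) :=
  let a := (PySem.Str.split? string ",").getD []   -- sep is the nonempty literal ",": split? is always `some` here
  (pvLoopA size a ([], 0, [])).1

-- ===== PORT B =====
def string_to_mat_alt (string : String) (size : Int) : List (List String) :=
  let a := (PySem.Str.split? string ",").getD []   -- sep is the nonempty literal ",": split? is always `some` here
  if size = 0 then []
  else
    let n := PySem.Int.floordiv (a.length : Int) size
    (PySem.List.pyRange 0 n 1).map (fun i => PySem.List.slice a (some (i * size)) (some ((i + 1) * size)))

-- ===== PRECONDITION & SPEC =====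
def Spec_string_to_mat (string : String) (size : Int) (out : List (List String)) : Prop := out = string_to_mat_alt string size
instance (string : String) (size : Int) (out : List (List String)) : Decidable (Spec_string_to_mat string size out) := by unfold Spec_string_to_mat; infer_instance

-- ===== CLAIM (what is proved, stated in full; the proofs are below) =====
def Claim_equal_string_to_mat : Prop := ∀ (string : String) (size : Int), Dom_string_to_mat string size → Spec_string_to_mat string size (string_to_mat string size)

-- ===== LEMMAS AND PROOFS =====

-- B's body as a function of the split list, for the induction
def pvChunksB (size : Int) (a : List String) : List (List String) :=
  if size = 0 then []
  else (PySem.List.pyRange 0 (PySem.Int.floordiv (a.length : Int) size) 1).map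
        (fun i => PySem.List.slice a (some (i * size)) (some ((i + 1) * size)))

theorem pvFloordiv_nonpos (m s : Int) (hm : 0 ≤ m) (hs : s < 0) : PySem.Int.floordiv m s ≤ 0 := by
  by_contra h
  push_neg at h
  have heq := PySem.Int.floordiv_mul_add_mod m s
  have hb := PySem.Int.mod_neg_bounds m hs
  nlinarith [heq, hb.1, hb.2, h]

-- A's loop never fires when the counter can never reach size
theorem pvLoopA_stuck (size : Int) (hs : size ≤ 0) :
    ∀ (l : List String) (ret : List (List String)) (place : Int) (inner : List String),
      0 ≤ place → pvLoopA size l (ret, place, inner) = (ret, place + l.length, inner ++ l) := by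
  intro l
  induction l with
  | nil => intro ret place inner _; simp [pvLoopA]
  | cons i rest ih =>
      intro ret place inner hp
      have hne : ¬ (place + 1 = size) := by omega
      simp only [pvLoopA, if_neg hne]
      rw [ih (ret) (place + 1) (inner ++ [i]) (by omega)]
      simp only [Prod.mk.injEq, List.length_cons]
      refine ⟨trivial, by push_cast; ring, by simp⟩
theorem pvLoopA_short (size : Int) :
    ∀ (l : List String) (ret : List (List String)) (place : Int) (inner : List String),
      place + l.length < size → pvLoopA size l (ret, place, inner) = (ret, place + l.length, inner ++ l) := by
  intro l
  induction l with
  | nil => intro ret place inner _; simp [pvLoopA]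
  | cons i rest ih =>
      intro ret place inner h
      simp only [List.length_cons] at h
      have hne : ¬ (place + 1 = size) := by push_cast at h; omega
      simp only [pvLoopA, if_neg hne]
      rw [ih (ret) (place + 1) (inner ++ [i]) (by push_cast at h ⊢; omega)]
      simp only [Prod.mk.injEq, List.length_cons]
      refine ⟨trivial, by push_cast; ring, by simp⟩

theorem pvLoopA_append (size : Int) :
    ∀ (l₁ l₂ : List String) (st : List (List String) × Int × List String),
      pvLoopA size (l₁ ++ l₂) st = pvLoopA size l₂ (pvLoopA size l₁ st) := by
  intro l₁
  induction l₁ with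
  | nil => intro l₂ st; simp [pvLoopA]
  | cons i rest ih =>
      intro l₂ st
      obtain ⟨ret, place, inner⟩ := st
      by_cases h : place + 1 = size
      · simp only [List.cons_append, pvLoopA, if_pos h]; exact ih _ _
      · simp only [List.cons_append, pvLoopA, if_neg h]; exact ih _ _

-- the loop over exactly the tokens completing one row flushes that row and resets the state
theorem pvLoopA_fire (size : Int) (l : List String) (ret : List (List String)) (place : Int)
    (inner : List String) (hne : l ≠ []) (hfill : place + l.length = size) :
    pvLoopA size l (ret, place, inner) = (ret ++ [inner ++ l], 0, []) := by
  obtain ⟨front, last, rfl⟩ := List.eq_nil_or_concat l |>.resolve_left hne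
  rw [List.concat_eq_append, pvLoopA_append,
      pvLoopA_short size front ret place inner (by
        simp only [List.concat_eq_append, List.length_append, List.length_cons, List.length_nil] at hfill
        push_cast at hfill ⊢; omega)]
  have hfire : place + (front.length : Int) + 1 = size := by
    simp only [List.concat_eq_append, List.length_append, List.length_cons, List.length_nil] at hfill
    push_cast at hfill ⊢; omega
  simp only [pvLoopA, if_pos hfire]
  simp

-- the accumulated rows are a prefix independent of the rest of the run
theorem pvLoopA_ret (size : Int) :
    ∀ (l : List String) (ret : List (List String)) (place : Int) (inner : List String),
      (pvLoopA size l (ret, place, inner)).1 = ret ++ (pvLoopA size l ([], place, inner)).1 := by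
  intro l
  induction l with
  | nil => intro ret place inner; simp [pvLoopA]
  | cons i rest ih =>
      intro ret place inner
      by_cases h : place + 1 = size
      · simp only [pvLoopA, if_pos h, List.nil_append]
        rw [ih (ret ++ [inner ++ [i]]), ih ([inner ++ [i]])]
        simp
      · simp only [pvLoopA, if_neg h]
        exact ih ret (place + 1) (inner ++ [i])

-- a shifted row slice is a row slice of the dropped list
theorem pvSliceShift (a : List String) (k j : Nat) :
    PySem.List.slice a (some ((1 + (j : Int)) * k)) (some ((1 + (j : Int) + 1) * k))
      = PySem.List.slice (a.drop k) (some ((0 + (j : Int)) * k)) (some ((0 + (j : Int) + 1) * k)) := by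
  rw [PySem.List.slice_toNat a (by positivity) (by positivity),
      PySem.List.slice_toNat (a.drop k) (by positivity) (by positivity)]
  have e1 : ((1 + (j : Int)) * k).toNat = k + j * k := by
    rw [show (1 + (j : Int)) * k = ((k + j * k : Nat) : Int) by push_cast; ring, Int.toNat_natCast]
  have e2 : ((1 + (j : Int) + 1) * k).toNat = k + j * k + k := by
    rw [show (1 + (j : Int) + 1) * k = ((k + j * k + k : Nat) : Int) by push_cast; ring, Int.toNat_natCast]
  have e3 : ((0 + (j : Int)) * k).toNat = j * k := by
    rw [show (0 + (j : Int)) * k = ((j * k : Nat) : Int) by push_cast; ring, Int.toNat_natCast]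
  have e4 : ((0 + (j : Int) + 1) * k).toNat = j * k + k := by
    rw [show (0 + (j : Int) + 1) * k = ((j * k + k : Nat) : Int) by push_cast; ring, Int.toNat_natCast]
  rw [e1, e2, e3, e4, List.drop_drop]
  congr 1
  omega

-- unfolding one complete row on B's side
theorem pvChunksB_cons (size : Int) (a : List String) (hs : 0 < size)
    (hlen : size ≤ (a.length : Int)) :
    pvChunksB size a = a.take size.toNat :: pvChunksB size (a.drop size.toNat) := by
  obtain ⟨k, rfl⟩ : ∃ k : Nat, size = (k : Int) := ⟨size.toNat, (Int.toNat_of_nonneg hs.le).symm⟩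
  have hk : 0 < k := by exact_mod_cast hs
  have hka : k ≤ a.length := by exact_mod_cast hlen
  have hn : PySem.Int.floordiv (a.length : Int) (k : Int) = ((a.length / k : Nat) : Int) :=
    PySem.Int.floordiv_natCast _ _
  have hn' : PySem.Int.floordiv ((a.drop k).length : Int) (k : Int) = (((a.length - k) / k : Nat) : Int) := by
    rw [List.length_drop]; exact PySem.Int.floordiv_natCast _ _
  have hq : 1 ≤ a.length / k := (Nat.one_le_div_iff hk).2 hka
  have hrange : PySem.List.pyRange 0 ((a.length / k : Nat) : Int) 1
      = 0 :: PySem.List.pyRange 1 ((a.length / k : Nat) : Int) 1 :=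
    PySem.List.pyRange_one_cons (by exact_mod_cast hq)
  have hcnt : (((a.length / k : Nat) : Int) - 1).toNat = (a.length - k) / k := by
    have hdiv : (a.length - k) / k = a.length / k - 1 := by
      have hm : a.length - k + k = a.length := Nat.sub_add_cancel hka
      have h2 : (a.length - k + k) / k = (a.length - k) / k + 1 := Nat.add_div_right _ hk
      rw [hm] at h2
      rw [h2, Nat.add_sub_cancel]
    rw [hdiv]
    have := hq
    omega
  simp only [pvChunksB, if_neg (by exact_mod_cast hk.ne' : ¬ ((k : Int) = 0)), hn, hn', hrange,
    List.map_cons, Int.toNat_natCast]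
  congr 1
  · rw [show ((0 : Int) * k) = 0 by ring, show ((0 : Int) + 1) * (k : Int) = (k : Int) by ring]
    rw [PySem.List.slice_toNat a le_rfl (by positivity)]
    simp
  · rw [PySem.List.pyRange_one 1, PySem.List.pyRange_one 0, List.map_map, List.map_map,
        hcnt, show ((((a.length - k) / k : Nat) : Int) - 0).toNat = (a.length - k) / k by omega]
    refine List.map_congr_left ?_
    intro j _
    exact pvSliceShift a k j

theorem pvChunksB_nil (size : Int) : pvChunksB size [] = [] := by
  by_cases h : size = 0
  · simp [pvChunksB, h]
  · rcases lt_or_gt_of_ne h with hneg | hpos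
    · have : PySem.Int.floordiv (([] : List String).length : Int) size ≤ 0 :=
        pvFloordiv_nonpos _ _ (by simp) hneg
      simp only [pvChunksB, if_neg h, PySem.List.pyRange_one_eq_nil this, List.map_nil]
    · have : PySem.Int.floordiv (([] : List String).length : Int) size = 0 := by
        rw [PySem.Int.floordiv_eq_iff_of_pos hpos]
        constructor <;> simp <;> omega
      simp only [pvChunksB, if_neg h, this, PySem.List.pyRange_one_eq_nil le_rfl, List.map_nil]

theorem pvMain (size : Int) :
    ∀ (n : Nat) (a : List String), a.length ≤ n →
      (pvLoopA size a ([], 0, [])).1 = pvChunksB size a := by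
  intro n
  induction n with
  | zero =>
      intro a ha
      have : a = [] := List.eq_nil_of_length_eq_zero (Nat.le_zero.1 ha)
      subst this
      simp [pvLoopA, pvChunksB_nil]
  | succ n ih =>
      intro a ha
      by_cases hs0 : size ≤ 0
      · rw [pvLoopA_stuck size hs0 a [] 0 [] le_rfl]
        rcases eq_or_lt_of_le hs0 with h0 | hneg
        · simp [pvChunksB, ← h0]
        · have : PySem.Int.floordiv ((a.length : Nat) : Int) size ≤ 0 :=
            pvFloordiv_nonpos _ _ (by positivity) hneg
          simp only [pvChunksB, if_neg (by omega : ¬ size = 0),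
            PySem.List.pyRange_one_eq_nil this, List.map_nil]
      · push_neg at hs0
        by_cases hlen : (a.length : Int) < size
        · rw [pvLoopA_short size a [] 0 [] (by simpa)]
          have : PySem.Int.floordiv (a.length : Int) size = 0 := by
            rw [PySem.Int.floordiv_eq_iff_of_pos hs0]
            constructor <;> [simp; simpa using hlen]
          simp only [pvChunksB, if_neg (by omega : ¬ size = 0), this,
            PySem.List.pyRange_one_eq_nil le_rfl, List.map_nil]
        · push_neg at hlen
          set k := size.toNat with hkdef
          have hk1 : 1 ≤ k := by omega
          have hka : k ≤ a.length := by
            have : (k : Int) = size := Int.toNat_of_nonneg hs0.le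
            omega
          have htake : (a.take k).length = k := by simp [hka]
          conv_lhs => rw [← List.take_append_drop k a]
          rw [pvLoopA_append,
              pvLoopA_fire size (a.take k) [] 0 []
                (by intro hc; rw [hc] at htake; simp at htake; omega)
                (by rw [htake, hkdef]; simp [Int.toNat_of_nonneg hs0.le]),
              pvLoopA_ret]
          rw [ih (a.drop k) (by simp; omega)]
          rw [pvChunksB_cons size a hs0 hlen]
          simp [hkdef]
-- ===== VERDICT (by name: the statement is the Claim_ definition above) =====
theorem string_to_mat_spec : Claim_equal_string_to_mat := by
  intro string size _
  unfold Spec_string_to_mat string_to_mat string_to_mat_alt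
  have := pvMain size ((PySem.Str.split? string ",").getD []).length
    ((PySem.Str.split? string ",").getD []) le_rfl
  simpa [pvChunksB] using this
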